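-- pv_equiv track=rewrite | github.com/Bibek2133/Automated-Log-Analyzer-Incident-Prioritization-Tool | log_analyzer.py | assign_priority
-- ===== SOURCE A (Python) =====
-- def assign_priority(issues, issue_counts):
--     priorities = {}
--
--     for message, count in issue_counts.items():
--         if any(level == "CRITICAL" for level, msg in issues if msg == message):
--             priorities[message] = "P1 - Critical"
--         elif count >= 3:
--             priorities[message] = "P2 - High"
--         elif count == 2:
--             priorities[message] = "P3 - Medium"
--         else:
--             priorities[message] = "P4 - Low"
--
--     return priorities
-- ===== SOURCE B (Python) =====
-- def assign_priority(issues, issue_counts):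
--     # Pass 1: count-based labels, in issue_counts order.
--     priorities = {}
--     for message, count in issue_counts.items():
--         if count >= 3:
--             priorities[message] = "P2 - High"
--         elif count == 2:
--             priorities[message] = "P3 - Medium"
--         else:
--             priorities[message] = "P4 - Low"
--     # Pass 2: one forward sweep over issues; overwrite (never insert) criticals.
--     for level, msg in issues:
--         if level == "CRITICAL" and msg in priorities:
--             priorities[msg] = "P1 - Critical"
--     return priorities
-- ===== Notes on version B (the rewrite author's own statement) =====
-- stated objective: faster
-- what changed: Replaces the per-key any() scan over all issues with a count-label pass over issue_counts followed by a single overwrite-only sweep over issues.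
import Mathlib
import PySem

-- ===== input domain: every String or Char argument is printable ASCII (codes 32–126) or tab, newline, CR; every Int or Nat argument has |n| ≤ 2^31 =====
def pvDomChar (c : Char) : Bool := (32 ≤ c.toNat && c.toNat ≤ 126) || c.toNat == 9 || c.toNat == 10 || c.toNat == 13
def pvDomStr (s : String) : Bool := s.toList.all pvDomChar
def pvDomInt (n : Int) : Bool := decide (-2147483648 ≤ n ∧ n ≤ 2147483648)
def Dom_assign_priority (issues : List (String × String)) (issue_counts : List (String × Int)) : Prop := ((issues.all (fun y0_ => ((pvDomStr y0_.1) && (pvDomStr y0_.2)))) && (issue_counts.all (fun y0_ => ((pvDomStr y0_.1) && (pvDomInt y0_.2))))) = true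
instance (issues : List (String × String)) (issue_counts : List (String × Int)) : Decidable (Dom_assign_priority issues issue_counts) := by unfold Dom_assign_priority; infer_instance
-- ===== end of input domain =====

-- B replaces A's per-key scan over all issues with one count-label pass plus one
-- overwrite-only sweep over issues (faster: O(n+m) vs O(n*m)).


-- ===== PORT A =====
-- any(level == "CRITICAL" for level, msg in issues if msg == message)
def pvCritA (issues : List (String × String)) (message : String) : Bool :=
  (issues.filter (fun p => p.2 == message)).any (fun p => p.1 == "CRITICAL")

def assign_priority (issues : List (String × String)) (issue_counts : List (String × Int)) : List (String × String) :=
  (issue_counts.foldl (fun priorities mc =>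
    if pvCritA issues mc.1 then priorities.insert mc.1 "P1 - Critical"
    else if mc.2 ≥ 3 then priorities.insert mc.1 "P2 - High"
    else if mc.2 = 2 then priorities.insert mc.1 "P3 - Medium"
    else priorities.insert mc.1 "P4 - Low") (PySem.Dict.empty)).items

-- ===== PORT B =====
def assign_priority_alt (issues : List (String × String)) (issue_counts : List (String × Int)) : List (String × String) :=
  let pass1 := issue_counts.foldl (fun priorities mc =>
    if mc.2 ≥ 3 then priorities.insert mc.1 "P2 - High"
    else if mc.2 = 2 then priorities.insert mc.1 "P3 - Medium"
    else priorities.insert mc.1 "P4 - Low") (PySem.Dict.empty)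
  (issues.foldl (fun priorities lm =>
    if lm.1 == "CRITICAL" && priorities.contains lm.2 then priorities.insert lm.2 "P1 - Critical"
    else priorities) pass1).items

-- ===== PRECONDITION & SPEC =====
def Spec_assign_priority (issues : List (String × String)) (issue_counts : List (String × Int)) (out : List (String × String)) : Prop := out = assign_priority_alt issues issue_counts
instance (issues : List (String × String)) (issue_counts : List (String × Int)) (out : List (String × String)) : Decidable (Spec_assign_priority issues issue_counts out) := by unfold Spec_assign_priority; infer_instance

-- ===== CLAIM (what is proved, stated in full; the proofs are below) =====
def Claim_equal_assign_priority : Prop := ∀ (issues : List (String × String)) (issue_counts : List (String × Int)), Dom_assign_priority issues issue_counts → Spec_assign_priority issues issue_counts (assign_priority issues issue_counts)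

-- ===== LEMMAS AND PROOFS =====

-- map over the values of a dict, keyed
def mapVals (d : PySem.Dict String String) (f : String → String → String) : PySem.Dict String String :=
  PySem.Dict.mk (d.items.map (fun p => (p.1, f p.1 p.2)))

theorem keys_mapVals (d : PySem.Dict String String) (f : String → String → String) :
    (mapVals d f).keys = d.keys := by
  simp [mapVals, PySem.Dict.keys, List.map_map, Function.comp]

theorem contains_mapVals (d : PySem.Dict String String) (f : String → String → String) (k : String) :
    (mapVals d f).contains k = d.contains k := by
  rw [PySem.Dict.contains_eq_decide_mem_keys, PySem.Dict.contains_eq_decide_mem_keys, keys_mapVals]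

theorem insert_mapVals (d : PySem.Dict String String) (f : String → String → String) (k v : String) :
    mapVals (d.insert k v) f = (mapVals d f).insert k (f k v) := by
  apply PySem.Dict.ext
  by_cases hc : d.contains k = true
  · rw [mapVals, PySem.Dict.items_insert_of_contains _ _ hc,
        PySem.Dict.items_insert_of_contains _ _ (by rw [contains_mapVals]; exact hc)]
    simp only [mapVals, List.map_map]
    apply List.map_congr_left
    intro p _
    by_cases h : p.1 = k <;> simp [Function.comp, h]
  · rw [mapVals, PySem.Dict.items_insert_of_not_contains _ _ (by simpa using hc),
        PySem.Dict.items_insert_of_not_contains _ _ (by rw [contains_mapVals]; simpa using hc)]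
    simp [mapVals]

theorem mapVals_id (d : PySem.Dict String String) : mapVals d (fun _ v => v) = d := by
  apply PySem.Dict.ext
  simp [mapVals]

-- the count-based label, shared shape of both first loops
def pvLabel (c : Int) : String :=
  if c ≥ 3 then "P2 - High" else if c = 2 then "P3 - Medium" else "P4 - Low"

-- B's second pass rewrites each existing entry to P1 exactly when some CRITICAL issue names it
theorem pass2_eq (issues : List (String × String)) (d : PySem.Dict String String) :
    issues.foldl (fun priorities lm =>
        if lm.1 == "CRITICAL" && priorities.contains lm.2 then priorities.insert lm.2 "P1 - Critical"
        else priorities) d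
      = mapVals d (fun k v => if pvCritA issues k then "P1 - Critical" else v) := by
  induction issues generalizing d with
  | nil => simp [pvCritA, mapVals_id]
  | cons lm rest ih =>
    rcases lm with ⟨l, m⟩
    have hcrit : ∀ k, pvCritA ((l, m) :: rest) k = ((m == k && l == "CRITICAL") || pvCritA rest k) := by
      intro k
      simp [pvCritA, List.filter_cons]
      by_cases h : m = k <;> simp [h]
    simp only [List.foldl_cons]
    rw [ih]
    by_cases hl : l = "CRITICAL"
    · by_cases hc : d.contains m = true
      · rw [if_pos (by simp [hl, hc])]
        apply PySem.Dict.ext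
        rw [mapVals, PySem.Dict.items_insert_of_contains _ _ hc]
        simp only [mapVals, List.map_map]
        apply List.map_congr_left
        intro p _
        by_cases h : p.1 = m
        · have hcm : pvCritA (("CRITICAL", m) :: rest) m = true := by simp [pvCritA]
          simp [Function.comp, h, hl, hcm]
        · simp [Function.comp, h, hcrit, Ne.symm h]
      · rw [if_neg (by simp [hc])]
        apply PySem.Dict.ext
        simp only [mapVals]
        apply List.map_congr_left
        intro p hp
        have hm : m ∉ d.keys := by
          rw [PySem.Dict.contains_eq_decide_mem_keys] at hc
          simpa using hc
        have hne : p.1 ≠ m := by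
          intro h
          exact hm (h ▸ PySem.Dict.mem_keys_of_mem_items _ hp)
        simp [hcrit, Ne.symm hne]
    · rw [if_neg (by simp [hl])]
      apply PySem.Dict.ext
      simp only [mapVals]
      apply List.map_congr_left
      intro p _
      simp [hcrit, hl]

-- A's loop is B's first loop with the values rewritten through the critical predicate
theorem foldA_eq (issues : List (String × String)) (counts : List (String × Int))
    (d : PySem.Dict String String) :
    counts.foldl (fun priorities mc =>
        if pvCritA issues mc.1 then priorities.insert mc.1 "P1 - Critical"
        else if mc.2 ≥ 3 then priorities.insert mc.1 "P2 - High"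
        else if mc.2 = 2 then priorities.insert mc.1 "P3 - Medium"
        else priorities.insert mc.1 "P4 - Low")
      (mapVals d (fun k v => if pvCritA issues k then "P1 - Critical" else v))
      = mapVals (counts.foldl (fun priorities mc =>
          if mc.2 ≥ 3 then priorities.insert mc.1 "P2 - High"
          else if mc.2 = 2 then priorities.insert mc.1 "P3 - Medium"
          else priorities.insert mc.1 "P4 - Low") d)
        (fun k v => if pvCritA issues k then "P1 - Critical" else v) := by
  induction counts generalizing d with
  | nil => rfl
  | cons mc rest ih =>
    simp only [List.foldl_cons]
    rw [← ih]
    congr 1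
    split_ifs with hcr h3 h2 <;> rw [insert_mapVals] <;> simp [hcr]

theorem mapVals_empty (f : String → String → String) : mapVals PySem.Dict.empty f = PySem.Dict.empty := by
  apply PySem.Dict.ext
  simp [mapVals, PySem.Dict.empty]

-- ===== VERDICT (by name: the statement is the Claim_ definition above) =====
theorem assign_priority_spec : Claim_equal_assign_priority := by
  intro issues issue_counts _
  simp only [Spec_assign_priority, assign_priority, assign_priority_alt]
  rw [pass2_eq, ← foldA_eq, mapVals_empty]
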